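-- pv_equiv track=rewrite | github.com/jimenezj8/advent_of_code | 2021/8/part2.py | get_clues_from_unique
-- ===== SOURCE A (Python) =====
-- segments = {"a", "b", "c", "d", "e", "f", "g"}
--
-- positions = {"t", "tr", "tl", "m", "br", "bl", "b"}
--
-- mapping = {
--     0: positions.difference({"m"}),
--     1: {"tr", "br"},
--     2: positions.difference({"tl", "br"}),
--     3: positions.difference({"tl", "bl"}),
--     4: positions.difference({"t", "bl", "b"}),
--     5: positions.difference({"tr", "bl"}),
--     6: positions.difference({"tr"}),
--     7: {"t", "tr", "br"},
--     8: positions.copy(),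
--     9: positions.difference({"bl"}),
-- }
--
-- def filter_clues(number: int, characters: set[str], clues: dict[int, set[str]]):
--     keep = mapping[number]
--     toss = positions.difference(keep)
--
--     return_clues = clues.copy()
--     for position in keep:
--         return_clues[position].intersection_update(characters)
--     for position in toss:
--         return_clues[position].difference_update(characters)
--
--     return return_clues
--
-- def get_unique_val(sequence: str) -> str:
--     match len(sequence):
--         case 2:
--             return "1"
--         case 3:
--             return "7"
--         case 4:
--             return "4"
--         case 7:
--             return "8"
--
-- def get_clues_from_unique(sequences: list[str]) -> dict[str, set[str]]:
--     lengths = [len(seq) for seq in sequences]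
--     unique = [
--         sequences[index] for index, length in enumerate(lengths) if length in [2, 3, 4]
--     ]
--
--     clues = {loc: segments.copy() for loc in positions}
--     for seq in unique:
--         key = int(get_unique_val(seq))
--         clues = filter_clues(key, set([char for char in seq]), clues)
--
--     return clues
-- ===== SOURCE B (Python) =====
-- def get_clues_from_unique(sequences):
--     lit_by_len = {2: {"tr", "br"}, 3: {"t", "tr", "br"}, 4: {"tr", "tl", "m", "br"}}
--     observed = [(lit_by_len[len(s)], s) for s in sequences if len(s) in lit_by_len]
--     return {
--         pos: {c for c in "abcdefg"
--               if all((pos in lit) == (c in s) for lit, s in observed)}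
--         for pos in ("t", "tr", "tl", "m", "br", "bl", "b")
--     }
-- ===== Notes on version B (the rewrite author's own statement) =====
-- stated objective: simpler
-- what changed: B abandons A's set algebra (a clues dict mutated digit-by-digit through filter_clues' intersection/difference keep/toss loops, with dict copies and a digit-string round-trip through get_unique_val/int) and instead decides each (position, character) pair directly by one universal membership predicate: a character remains a candidate at a position iff every observed unique-length sequence lights that position exactly when it contains the character.
import Mathlib
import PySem

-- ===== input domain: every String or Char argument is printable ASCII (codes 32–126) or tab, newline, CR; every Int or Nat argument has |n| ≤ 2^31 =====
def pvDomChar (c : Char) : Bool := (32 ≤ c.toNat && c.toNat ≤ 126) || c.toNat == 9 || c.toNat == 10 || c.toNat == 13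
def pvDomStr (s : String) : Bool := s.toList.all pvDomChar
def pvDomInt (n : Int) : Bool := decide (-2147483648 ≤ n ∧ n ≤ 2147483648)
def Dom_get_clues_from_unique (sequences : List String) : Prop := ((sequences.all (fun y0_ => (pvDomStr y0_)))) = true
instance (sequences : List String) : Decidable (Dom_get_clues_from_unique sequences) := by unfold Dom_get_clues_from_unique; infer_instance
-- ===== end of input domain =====

-- B drops the set algebra entirely: instead of folding intersections/differences over a clues
-- dict, it characterises each candidate character by a single universal membership predicate
-- ("a character survives at a position iff, for every observed unique-length digit, the position
-- is lit exactly when the character occurs in the sequence"); objective: simpler.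


-- ===== PORT A =====
-- module constant `positions` (a Python set; canonical order chosen once, results compared as dicts/sets)
def pvPositionsA : List String := ["t", "tr", "tl", "m", "br", "bl", "b"]
-- module constant `segments`
def pvSegmentsA : PySem.Set String := ["a", "b", "c", "d", "e", "f", "g"]
-- module constant `mapping` (digit -> keep set; [] stands for the unreached KeyError cases)
def pvMappingA (number : Int) : List String :=
  match number with
  | 0 => ["t", "tr", "tl", "br", "bl", "b"]
  | 1 => ["tr", "br"]
  | 2 => ["t", "tr", "m", "bl", "b"]
  | 3 => ["t", "tr", "m", "br", "b"]
  | 4 => ["tr", "tl", "m", "br"]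
  | 5 => ["t", "tl", "m", "br", "b"]
  | 6 => ["t", "tl", "m", "br", "bl", "b"]
  | 7 => ["t", "tr", "br"]
  | 8 => ["t", "tr", "tl", "m", "br", "bl", "b"]
  | 9 => ["t", "tr", "tl", "m", "br", "b"]
  | _ => []

-- filter_clues: the two in-place loops over keep / toss = positions - keep touch each key of
-- the dict exactly once, so on the association list they are one map over the entries
-- (intersection for keys in keep, difference for the rest).
def pv_filter_clues (number : Int) (characters : PySem.Set String)
    (clues : List (String × List String)) : List (String × List String) :=
  clues.map (fun kv =>
    if (pvMappingA number).contains kv.1 then (kv.1, PySem.Set.inter kv.2 characters)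
    else (kv.1, PySem.Set.diff kv.2 characters))

def pv_get_unique_val (sequence : String) : Option String :=
  match PySem.Str.len sequence with
  | 2 => some "1"
  | 3 => some "7"
  | 4 => some "4"
  | 7 => some "8"
  | _ => none   -- Python falls off the match and returns None

-- set([char for char in seq])
def pvCharsA (seq : String) : PySem.Set String :=
  PySem.Set.ofList (seq.toList.map (fun c => String.ofList [c]))

def get_clues_from_unique (sequences : List String) : List (String × List String) :=
  let lengths := sequences.map PySem.Str.len
  let unique := ((PySem.List.enumerate lengths).filter
      (fun p => p.2 == 2 || p.2 == 3 || p.2 == 4)).map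
      (fun p => PySem.List.pyGetD sequences p.1 "")
  let clues := pvPositionsA.map (fun loc => (loc, pvSegmentsA))
  unique.foldl (fun cl seq =>
    -- key = int(get_unique_val(seq)); int(None) is unreachable here, rendered as .getD
    pv_filter_clues ((PySem.Int.ofStr? ((pv_get_unique_val seq).getD "")).getD 0)
      (pvCharsA seq) cl) clues

-- ===== PORT B =====
-- lit_by_len: length of a unique-length digit -> its lit positions (none = length not in dict)
def pvLitByLen (n : Int) : Option (List String) :=
  match n with
  | 2 => some ["tr", "br"]
  | 3 => some ["t", "tr", "br"]
  | 4 => some ["tr", "tl", "m", "br"]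
  | _ => none

def get_clues_from_unique_alt (sequences : List String) : List (String × List String) :=
  let observed := sequences.filterMap (fun s =>
    (pvLitByLen (PySem.Str.len s)).map (fun lit => (lit, s)))
  ["t", "tr", "tl", "m", "br", "bl", "b"].map (fun pos =>
    (pos, PySem.Set.ofList ((("abcdefg".toList).filter (fun c =>
      observed.all (fun p => (p.1.contains pos) == (p.2.toList.contains c)))).map
      (fun c => String.ofList [c]))))

-- ===== PRECONDITION & SPEC =====
def Spec_get_clues_from_unique (sequences : List String) (out : List (String × List String)) : Prop := out = get_clues_from_unique_alt sequences
instance (sequences : List String) (out : List (String × List String)) : Decidable (Spec_get_clues_from_unique sequences out) := by unfold Spec_get_clues_from_unique; infer_instance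

-- ===== CLAIM (what is proved, stated in full; the proofs are below) =====
def Claim_equal_get_clues_from_unique : Prop := ∀ (sequences : List String), Dom_get_clues_from_unique sequences → Spec_get_clues_from_unique sequences (get_clues_from_unique sequences)

-- ===== LEMMAS AND PROOFS =====

-- A's index-based selection of the unique-length entries is the plain filter by length.
theorem pv_unique_aux (Q : Int → Bool) (d : String) :
    ∀ (ys xs : List String),
      ((PySem.List.enumerate (ys.map PySem.Str.len) xs.length).filter
          (fun p => Q p.2)).map (fun p => PySem.List.pyGetD (xs ++ ys) p.1 d)
        = ys.filter (fun s => Q (PySem.Str.len s)) := by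
  intro ys
  induction ys with
  | nil => intro xs; simp [PySem.List.enumerate_nil]
  | cons y ys ih =>
    intro xs
    have hget : PySem.List.pyGetD (xs ++ y :: ys) (xs.length : Int) d = y := by
      rw [PySem.List.pyGetD_natCast]; simp
    have hrec := ih (xs ++ [y])
    simp only [List.length_append, List.length_cons, List.length_nil, List.append_assoc,
      List.singleton_append] at hrec
    push_cast at hrec
    rw [List.map_cons, PySem.List.enumerate_cons]
    by_cases hq : Q ((y.length : Int)) <;>
      simp [PySem.Str.len, hq, hget, hrec]

-- Folding a per-entry map over a list of updates = per-entry fold.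
theorem pv_map_fold {α K V : Type} (g : α → K → V → V) :
    ∀ (l : List α) (cl : List (K × V)),
      l.foldl (fun c u => c.map (fun kv => (kv.1, g u kv.1 kv.2))) cl
        = cl.map (fun kv => (kv.1, l.foldl (fun v u => g u kv.1 v) kv.2)) := by
  intro l
  induction l with
  | nil => intro cl; simp
  | cons u l ih =>
    intro cl
    simp only [List.foldl_cons, ih, List.map_map]
    rfl

-- B's comprehension = map over the length-filtered list.
theorem pv_observed_eq (sequences : List String) :
    sequences.filterMap (fun seq =>
        (pvLitByLen (PySem.Str.len seq)).map (fun lit => (lit, seq)))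
      = (sequences.filter (fun s =>
            PySem.Str.len s == 2 || PySem.Str.len s == 3 || PySem.Str.len s == 4)).map
          (fun s => ((pvLitByLen (PySem.Str.len s)).getD [], s)) := by
  induction sequences with
  | nil => rfl
  | cons s l ih =>
    rw [List.filterMap_cons, List.filter_cons]
    simp only [PySem.Str.len, String.length_toList] at ih
    by_cases h2 : (s.length : Int) = 2
    · simp [PySem.Str.len, h2, show pvLitByLen (2:Int) = some ["tr", "br"] from rfl, ih]
    · by_cases h3 : (s.length : Int) = 3
      · simp [PySem.Str.len, h3, show pvLitByLen (3:Int) = some ["t", "tr", "br"] from rfl, ih]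
      · by_cases h4 : (s.length : Int) = 4
        · simp [PySem.Str.len, h4, show pvLitByLen (4:Int) = some ["tr", "tl", "m", "br"] from rfl, ih]
        · have hk : pvLitByLen ((s.length : Int)) = none := by
            unfold pvLitByLen
            split <;> first | omega | rfl
          simp [PySem.Str.len, hk, h2, h3, h4, ih]

-- On a unique-length sequence, A's mapping[int(get_unique_val(seq))] is B's lit_by_len[len].
theorem pv_keep_agrees (s : String)
    (h : (PySem.Str.len s == 2 || PySem.Str.len s == 3 || PySem.Str.len s == 4) = true) :
    pvMappingA ((PySem.Int.ofStr? ((pv_get_unique_val s).getD "")).getD 0)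
      = (pvLitByLen (PySem.Str.len s)).getD [] := by
  simp only [Bool.or_eq_true, beq_iff_eq] at h
  rcases h with (h | h) | h <;>
  · unfold pv_get_unique_val
    rw [h]
    decide

-- filter_clues as a single map with the branch inside the pair.
theorem pv_filter_clues_eq (n : Int) (ch : PySem.Set String) (cl : List (String × List String)) :
    pv_filter_clues n ch cl = cl.map (fun kv =>
      (kv.1, if (pvMappingA n).contains kv.1 then PySem.Set.inter kv.2 ch
             else PySem.Set.diff kv.2 ch)) := by
  unfold pv_filter_clues
  apply List.map_congr_left
  intro kv _
  split <;> rfl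

-- Membership of a singleton string in set(seq) = char membership in the sequence.
theorem pv_charsA_contains (s : String) (c : Char) :
    (pvCharsA s).contains (String.ofList [c]) = s.toList.contains c := by
  rw [Bool.eq_iff_iff]
  simp only [pvCharsA, PySem.Set.contains_eq_listContains, List.contains_iff_mem,
    PySem.Set.mem_ofList, List.mem_map]
  constructor
  · rintro ⟨a, ha, h⟩
    have h2 := congrArg String.toList h
    simp at h2; subst h2; exact ha
  · intro h; exact ⟨c, h, rfl⟩

-- One intersection/difference step on a filtered segment list = tightening the filter predicate.
theorem pv_step_eq (b : Bool) (s : String) (q : Char → Bool) :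
    (if b then PySem.Set.inter (("abcdefg".toList.filter q).map (fun c => String.ofList [c])) (pvCharsA s)
     else PySem.Set.diff (("abcdefg".toList.filter q).map (fun c => String.ofList [c])) (pvCharsA s))
    = (("abcdefg".toList.filter (fun c => q c && (b == s.toList.contains c))).map
        (fun c => String.ofList [c])) := by
  cases b <;>
  · simp only [Bool.false_eq_true, if_false, if_true, PySem.Set.inter, PySem.Set.diff,
      List.filter_map, List.filter_filter]
    congr 1
    apply List.filter_congr
    intro c _
    simp only [Function.comp, pv_charsA_contains]
    cases hx : s.toList.contains c <;> simp_all

-- The whole fold at one position, with a generalized starting predicate.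
theorem pv_fold_char (loc : String) :
    ∀ (l : List String) (q : Char → Bool),
      l.foldl (fun v s =>
          if ((pvLitByLen (PySem.Str.len s)).getD []).contains loc
          then PySem.Set.inter v (pvCharsA s) else PySem.Set.diff v (pvCharsA s))
        (("abcdefg".toList.filter q).map (fun c => String.ofList [c]))
      = ("abcdefg".toList.filter (fun c =>
            q c && l.all (fun s =>
              (((pvLitByLen (PySem.Str.len s)).getD []).contains loc)
                == (s.toList.contains c)))).map (fun c => String.ofList [c]) := by
  intro l
  induction l with
  | nil => intro q; simp
  | cons s l ih =>
    intro q
    rw [List.foldl_cons, pv_step_eq, ih]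
    congr 1
    apply List.filter_congr
    intro c _
    simp [Bool.and_assoc]

-- The final filtered singleton-string lists carry no duplicates, so set() is the identity.
theorem pv_nodup_result (p : Char → Bool) :
    (("abcdefg".toList.filter p).map (fun c => String.ofList [c])).Nodup := by
  apply List.Nodup.map
  · intro a b h
    have h2 := congrArg String.toList h
    simpa using h2
  · exact List.Nodup.filter _ (by decide)

-- ===== VERDICT (by name: the statement is the Claim_ definition above) =====
theorem get_clues_from_unique_spec : Claim_equal_get_clues_from_unique := by
  intro sequences _
  unfold Spec_get_clues_from_unique get_clues_from_unique get_clues_from_unique_alt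
  simp only
  have hu := pv_unique_aux (fun n => n == 2 || n == 3 || n == 4) "" sequences []
  simp only [List.nil_append, List.length_nil, Nat.cast_zero] at hu
  rw [hu, pv_observed_eq]
  simp only [pv_filter_clues_eq]
  rw [pv_map_fold (fun u k v =>
    if (pvMappingA ((PySem.Int.ofStr? ((pv_get_unique_val u).getD "")).getD 0)).contains k
    then PySem.Set.inter v (pvCharsA u) else PySem.Set.diff v (pvCharsA u))]
  rw [List.map_map]
  apply List.map_congr_left
  intro loc _
  simp only [Function.comp]
  refine Prod.ext rfl ?_
  have hstep : (sequences.filter (fun s =>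
        PySem.Str.len s == 2 || PySem.Str.len s == 3 || PySem.Str.len s == 4)).foldl
      (fun v s =>
        if (pvMappingA ((PySem.Int.ofStr? ((pv_get_unique_val s).getD "")).getD 0)).contains loc
        then PySem.Set.inter v (pvCharsA s) else PySem.Set.diff v (pvCharsA s)) pvSegmentsA
    = (sequences.filter (fun s =>
        PySem.Str.len s == 2 || PySem.Str.len s == 3 || PySem.Str.len s == 4)).foldl
      (fun v s =>
        if ((pvLitByLen (PySem.Str.len s)).getD []).contains loc
        then PySem.Set.inter v (pvCharsA s) else PySem.Set.diff v (pvCharsA s)) pvSegmentsA := by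
    apply PySem.List.foldl_congr_mem
    intro acc x hx
    rw [pv_keep_agrees x (List.mem_filter.mp hx).2]
  rw [hstep]
  have hbase : pvSegmentsA
      = ("abcdefg".toList.filter (fun _ => true)).map (fun c => String.ofList [c]) := by decide
  rw [hbase, pv_fold_char]
  rw [PySem.Set.ofList_eq_self_of_nodup _ (pv_nodup_result _)]
  simp [List.all_map, Function.comp, Bool.true_and]
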